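-- pv_equiv track=rewrite | github.com/shadow431/legoParser | src/legoParser.py | sortLegos
-- ===== SOURCE A (Python) =====
-- from operator import itemgetter
--
-- def sortLegos(legos,ssLegos,legoSet,pieceType):
--     new = []
--     old = []
--     legos = sorted(legos,key=itemgetter('id'))
--     ssLegos = sorted(ssLegos,key=itemgetter('id'))
--     a = 0
--     count = 0
--     for lego in ssLegos:
--         if a < len(legos):
--             while legos[a]['id'] <= lego['id']:
--                 if legos[a]['id'] == lego['id']:
--                     legos[a][pieceType] = lego[pieceType]
--                     legos[a]['row'] = lego['row']
--                     #if re.match(r''+legoSet+'',lego['sets']):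
--                     #    legos[a]['sets'] = legoSet
--                     #else:
--                     #    legos[a]['sets'] = lego['sets'] + " " + legoSet
--                     #legoHold = legos[a]
--                     legoHold = lego
--                     #legoHold.pop('id') #why?
--                     old.append(legoHold)
--                 else:
--                     #legos[a]['sets'] = legoSet
--                     new.append(legos[a])
--                 a += 1
--                 if a >= len(legos):
--                     break
--     while a < len(legos):
--         legos[a]['sets'] = legoSet
--         new.append(legos[a])
--         a += 1
--     return new,old
-- ===== SOURCE B (Python) =====
-- from operator import itemgetter
--
-- def sortLegos(legos, ssLegos, legoSet, pieceType):
--     # Hash join: index ssLegos by id (first occurrence in sorted order wins),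
--     # remember the maximal ss id; one classification pass over sorted legos.
--     # Note: A also copies pieceType/row into matched lego dicts in place; those
--     # dicts never reach the return value, so B (return-value equivalent) skips it.
--     ssSorted = sorted(ssLegos, key=itemgetter('id'))
--     byId = {}
--     for ss in ssSorted:
--         byId.setdefault(ss['id'], ss)
--     maxId = ssSorted[-1]['id'] if ssSorted else None
--     new = []
--     old = []
--     for lego in sorted(legos, key=itemgetter('id')):
--         ss = byId.get(lego['id'])
--         if ss is not None:
--             old.append(ss)
--         else:
--             if maxId is None or lego['id'] > maxId:
--                 lego['sets'] = legoSet
--             new.append(lego)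
--     return new, old
-- ===== Notes on version B (the rewrite author's own statement) =====
-- stated objective: simpler
-- what changed: Replaces A's index-based two-pointer sort-merge (nested while with manual cursor, break and trailing drain loop) by a hash join: one dict mapping id to first ssLego plus the maximal ss id, then a single classification pass over sorted(legos); equivalence is about the return value (A also mutates matched input dicts in place, B does not).
import Mathlib
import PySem

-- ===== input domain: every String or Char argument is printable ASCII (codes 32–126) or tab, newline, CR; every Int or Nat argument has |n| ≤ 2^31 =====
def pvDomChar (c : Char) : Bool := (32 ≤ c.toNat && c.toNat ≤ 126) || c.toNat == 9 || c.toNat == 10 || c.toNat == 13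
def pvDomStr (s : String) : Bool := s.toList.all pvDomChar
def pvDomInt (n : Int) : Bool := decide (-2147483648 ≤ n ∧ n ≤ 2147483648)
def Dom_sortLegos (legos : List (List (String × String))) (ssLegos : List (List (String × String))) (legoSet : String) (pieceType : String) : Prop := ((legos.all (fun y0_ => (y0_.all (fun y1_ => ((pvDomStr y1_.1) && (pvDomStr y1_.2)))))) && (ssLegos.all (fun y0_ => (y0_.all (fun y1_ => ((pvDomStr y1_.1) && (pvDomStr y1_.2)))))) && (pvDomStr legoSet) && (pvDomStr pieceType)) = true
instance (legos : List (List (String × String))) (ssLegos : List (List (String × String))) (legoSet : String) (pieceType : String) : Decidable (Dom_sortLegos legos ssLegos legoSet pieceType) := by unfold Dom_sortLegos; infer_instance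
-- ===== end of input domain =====

-- B replaces A's two-pointer sort-merge by a hash join (id -> first ssLego, plus the maximal ss id);
-- equivalence is about the RETURN value only: A also mutates matched input dicts (pieceType/row) in place, B does not.

-- dicts are List (String × String) with Python dict semantics via PySem.Dict
abbrev PVD : Type := List (String × String)

def pvGid (d : PVD) : String := (PySem.Dict.mk d).getD "id" ""
def pvDGet (d : PVD) (k : String) : String := (PySem.Dict.mk d).getD k ""
def pvDSet (d : PVD) (k v : String) : PVD := ((PySem.Dict.mk d).insert k v).items

-- ===== PORT A =====
-- the inner `while legos[a]['id'] <= lego['id']: … a += 1; if a >= len(legos): break`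
def sortLegosInner (pieceType : String) (lego : PVD) (legos : List PVD) (a : Nat)
    (new old : List PVD) : List PVD × Nat × List PVD × List PVD :=
  if h : a < legos.length then
    let cur := legos[a]
    if pvGid cur ≤ pvGid lego then
      if pvGid cur == pvGid lego then
        -- legos[a][pieceType] = lego[pieceType]; legos[a]['row'] = lego['row']; old.append(lego)
        let legos' := legos.set a (pvDSet (pvDSet cur pieceType (pvDGet lego pieceType)) "row" (pvDGet lego "row"))
        if a + 1 ≥ legos'.length then (legos', a + 1, new, old ++ [lego])
        else sortLegosInner pieceType lego legos' (a + 1) new (old ++ [lego])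
      else
        -- new.append(legos[a])
        if a + 1 ≥ legos.length then (legos, a + 1, new ++ [cur], old)
        else sortLegosInner pieceType lego legos (a + 1) (new ++ [cur]) old
    else (legos, a, new, old)
  else (legos, a, new, old)
termination_by legos.length - a
decreasing_by all_goals first
  | (simp [List.length_set]; omega)
  | omega

-- the trailing `while a < len(legos): legos[a]['sets'] = legoSet; new.append(legos[a]); a += 1`
def sortLegosTail (legoSet : String) (legos : List PVD) (a : Nat) (new : List PVD) : List PVD :=
  if h : a < legos.length then
    let v := pvDSet legos[a] "sets" legoSet
    sortLegosTail legoSet (legos.set a v) (a + 1) (new ++ [v])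
  else new
termination_by legos.length - a
decreasing_by simp [List.length_set]; omega

def sortLegos (legos : List (List (String × String))) (ssLegos : List (List (String × String)))
    (legoSet : String) (pieceType : String) :
    (List (List (String × String))) × (List (List (String × String))) :=
  let legosS := PySem.List.sorted legos pvGid
  let ssS := PySem.List.sorted ssLegos pvGid
  let st := ssS.foldl
    (fun (st : List PVD × Nat × List PVD × List PVD) lego =>
      if st.2.1 < st.1.length then sortLegosInner pieceType lego st.1 st.2.1 st.2.2.1 st.2.2.2
      else st)
    (legosS, 0, ([] : List PVD), ([] : List PVD))
  (sortLegosTail legoSet st.1 st.2.1 st.2.2.1, st.2.2.2)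

-- ===== PORT B =====
-- one classification step of Source B's single pass over sorted(legos)
def pvBStep (byId : PySem.Dict String PVD) (maxId : Option String) (legoSet : String)
    (acc : List PVD × List PVD) (lego : PVD) : List PVD × List PVD :=
  match byId.get? (pvGid lego) with
  | some ss => (acc.1, acc.2 ++ [ss])
  | none =>
    let lego' := if (match maxId with | none => true | some m => decide (m < pvGid lego)) then
        pvDSet lego "sets" legoSet else lego
    (acc.1 ++ [lego'], acc.2)

def sortLegos_alt (legos : List (List (String × String))) (ssLegos : List (List (String × String)))
    (legoSet : String) (pieceType : String) :
    (List (List (String × String))) × (List (List (String × String))) :=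
  let ssS := PySem.List.sorted ssLegos pvGid
  let byId := ssS.foldl (fun d ss => d.setdefault (pvGid ss) ss) (PySem.Dict.mk [])
  let maxId : Option String := (PySem.List.pyGet? ssS (-1)).map pvGid
  (PySem.List.sorted legos pvGid).foldl (pvBStep byId maxId legoSet) ([], [])

-- ===== PRECONDITION & SPEC =====
def pvHasKey (d : PVD) (k : String) : Bool := ((PySem.Dict.mk d).get? k).isSome

-- Pre_ excludes exactly the inputs where A raises KeyError: a lego/ssLego without 'id', or a
-- matched ssLego (first of its id, id present among lego ids) without the pieceType or 'row' key.
def Pre_sortLegos (legos : List (List (String × String))) (ssLegos : List (List (String × String)))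
    (legoSet : String) (pieceType : String) : Prop :=
  (∀ d ∈ legos, pvHasKey d "id" = true) ∧ (∀ d ∈ ssLegos, pvHasKey d "id" = true) ∧
  (∀ d ∈ ssLegos, ssLegos.find? (fun e => pvGid e == pvGid d) = some d →
    pvGid d ∈ legos.map pvGid → pvHasKey d pieceType = true ∧ pvHasKey d "row" = true)

instance (legos : List (List (String × String))) (ssLegos : List (List (String × String))) (legoSet : String) (pieceType : String) : Decidable (Pre_sortLegos legos ssLegos legoSet pieceType) := by unfold Pre_sortLegos; infer_instance

def pvWitness_sortLegos : (List (List (String × String))) × (List (List (String × String))) × String × String :=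
  ([[("id", "a")], [("id", "b")]], [[("id", "a"), ("row", "1"), ("pt", "x")]], "S", "pt")

def Spec_sortLegos (legos : List (List (String × String))) (ssLegos : List (List (String × String)))
    (legoSet : String) (pieceType : String)
    (out : (List (List (String × String))) × (List (List (String × String)))) : Prop :=
  out = sortLegos_alt legos ssLegos legoSet pieceType

instance (legos : List (List (String × String))) (ssLegos : List (List (String × String))) (legoSet : String) (pieceType : String) (out : (List (List (String × String))) × (List (List (String × String)))) : Decidable (Spec_sortLegos legos ssLegos legoSet pieceType out) := by unfold Spec_sortLegos; infer_instance

-- ===== CLAIM =====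
def Claim_equal_sortLegos : Prop := ∀ (legos : List (List (String × String))) (ssLegos : List (List (String × String))) (legoSet : String) (pieceType : String), Dom_sortLegos legos ssLegos legoSet pieceType → Pre_sortLegos legos ssLegos legoSet pieceType → Spec_sortLegos legos ssLegos legoSet pieceType (sortLegos legos ssLegos legoSet pieceType)


-- ===== LEMMAS AND PROOFS =====

-- proof-only model of the inner while loop, on the suffix legos.drop a
def pvSpecInner (lego : PVD) (R : List PVD) (new old : List PVD) :
    List PVD × List PVD × List PVD :=
  match R with
  | [] => ([], new, old)
  | c :: R' =>
    if pvGid c ≤ pvGid lego then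
      if pvGid c == pvGid lego then pvSpecInner lego R' new (old ++ [lego])
      else pvSpecInner lego R' (new ++ [c]) old
    else (c :: R', new, old)

def pvSpecOuter (S : List PVD) (R : List PVD) (new old : List PVD) :
    List PVD × List PVD × List PVD :=
  S.foldl (fun t s => pvSpecInner s t.1 t.2.1 t.2.2) (R, new, old)

def pvCond (m : Option String) (y : String) : Bool :=
  match m with | none => true | some mm => decide (mm < y)

lemma pvBStep_eq (d : PySem.Dict String PVD) (m : Option String) (legoSet : String)
    (acc : List PVD × List PVD) (lego : PVD) :
    pvBStep d m legoSet acc lego =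
      match d.get? (pvGid lego) with
      | some ss => (acc.1, acc.2 ++ [ss])
      | none => (acc.1 ++ [if pvCond m (pvGid lego) then pvDSet lego "sets" legoSet else lego], acc.2) := rfl

lemma pvSpecInner_len_le (lego : PVD) (R : List PVD) (new old : List PVD) :
    (pvSpecInner lego R new old).1.length ≤ R.length := by
  induction R generalizing new old with
  | nil => simp [pvSpecInner]
  | cons c R' ih =>
    simp only [pvSpecInner]
    split
    · split
      · exact le_trans (ih _ _) (by simp)
      · exact le_trans (ih _ _) (by simp)
    · simp

lemma inner_bridge (pieceType : String) (lego : PVD) :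
    ∀ n (legos : List PVD) (a : Nat) (new old : List PVD), legos.length - a ≤ n → a ≤ legos.length →
    ∃ legos' : List PVD,
      legos'.length = legos.length ∧
      sortLegosInner pieceType lego legos a new old =
        (legos', legos.length - (pvSpecInner lego (legos.drop a) new old).1.length,
         (pvSpecInner lego (legos.drop a) new old).2.1,
         (pvSpecInner lego (legos.drop a) new old).2.2) ∧
      legos'.drop (legos.length - (pvSpecInner lego (legos.drop a) new old).1.length) =
        (pvSpecInner lego (legos.drop a) new old).1 := by
  intro n
  induction n with
  | zero =>
    intro legos a new old hn ha
    have he : a = legos.length := by omega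
    rw [sortLegosInner, dif_neg (by omega)]
    rw [List.drop_eq_nil_of_le (by omega)]
    exact ⟨legos, rfl, by simp [pvSpecInner, he], by simp [pvSpecInner]⟩
  | succ n ih =>
    intro legos a new old hn ha
    by_cases hlt : a < legos.length
    · rw [sortLegosInner, dif_pos hlt]
      have hdrop : legos.drop a = legos[a] :: legos.drop (a + 1) := (List.getElem_cons_drop hlt).symm
      rw [hdrop]
      simp only [pvSpecInner]
      by_cases h1 : pvGid legos[a] ≤ pvGid lego
      · rw [if_pos h1, if_pos h1]
        by_cases h2 : (pvGid legos[a] == pvGid lego) = true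
        · rw [if_pos h2, if_pos h2]
          have hlen2 : (legos.set a (pvDSet (pvDSet legos[a] pieceType (pvDGet lego pieceType)) "row" (pvDGet lego "row"))).length = legos.length := by simp
          have hdrop2 : (legos.set a (pvDSet (pvDSet legos[a] pieceType (pvDGet lego pieceType)) "row" (pvDGet lego "row"))).drop (a + 1) = legos.drop (a + 1) := List.drop_set_of_lt (by omega)
          by_cases h3 : a + 1 ≥ (legos.set a (pvDSet (pvDSet legos[a] pieceType (pvDGet lego pieceType)) "row" (pvDGet lego "row"))).length
          · rw [if_pos h3]
            have he : a + 1 = legos.length := by rw [hlen2] at h3; omega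
            have hnil : legos.drop (a + 1) = [] := List.drop_eq_nil_of_le (by omega)
            rw [hnil]
            simp only [pvSpecInner]
            refine ⟨_, hlen2, by simp [← he], ?_⟩
            simp only [List.length_nil, Nat.sub_zero]
            exact List.drop_eq_nil_of_le (by omega)
          · rw [if_neg h3]
            obtain ⟨legos', hL, hEq, hD⟩ := ih (legos.set a (pvDSet (pvDSet legos[a] pieceType (pvDGet lego pieceType)) "row" (pvDGet lego "row"))) (a + 1) new (old ++ [lego]) (by rw [hlen2]; omega) (by omega)
            rw [hdrop2] at hEq hD
            rw [hlen2] at hL hEq hD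
            exact ⟨legos', hL, hEq, hD⟩
        · rw [if_neg h2, if_neg h2]
          by_cases h3 : a + 1 ≥ legos.length
          · rw [if_pos h3]
            have he : a + 1 = legos.length := by omega
            have hnil : legos.drop (a + 1) = [] := List.drop_eq_nil_of_le (by omega)
            rw [hnil]
            simp only [pvSpecInner]
            refine ⟨legos, rfl, by simp [← he], ?_⟩
            simp only [List.length_nil, Nat.sub_zero]
            exact List.drop_eq_nil_of_le (by omega)
          · rw [if_neg h3]
            exact ih legos (a + 1) (new ++ [legos[a]]) old (by omega) (by omega)
      · rw [if_neg h1, if_neg h1]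
        have hlen : (legos[a] :: legos.drop (a + 1)).length = legos.length - a := by
          rw [← hdrop, List.length_drop]
        refine ⟨legos, rfl, ?_, ?_⟩
        · rw [hlen]
          have : legos.length - (legos.length - a) = a := by omega
          rw [this]
        · rw [hlen]
          have : legos.length - (legos.length - a) = a := by omega
          rw [this, hdrop]
    · have he : a = legos.length := by omega
      rw [sortLegosInner, dif_neg (by omega)]
      rw [List.drop_eq_nil_of_le (by omega)]
      exact ⟨legos, rfl, by simp [pvSpecInner, he], by simp [pvSpecInner]⟩

lemma tail_eq (legoSet : String) :
    ∀ n (legos : List PVD) (a : Nat) (new : List PVD), legos.length - a ≤ n →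
    sortLegosTail legoSet legos a new = new ++ (legos.drop a).map (fun d => pvDSet d "sets" legoSet) := by
  intro n
  induction n with
  | zero =>
    intro legos a new h
    have ha : ¬ a < legos.length := by omega
    rw [sortLegosTail, dif_neg ha, List.drop_eq_nil_of_le (by omega)]
    simp
  | succ n ih =>
    intro legos a new h
    by_cases ha : a < legos.length
    · rw [sortLegosTail, dif_pos ha]
      rw [ih (legos.set a (pvDSet legos[a] "sets" legoSet)) (a + 1) _ (by simp; omega)]
      rw [List.drop_set_of_lt (by omega : a < a + 1)]
      rw [← List.getElem_cons_drop ha]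
      simp
      rw [← List.getElem_cons_drop (show a < (List.map (fun d => pvDSet d "sets" legoSet) legos).length by simpa using ha), List.getElem_map]
    · rw [sortLegosTail, dif_neg ha, List.drop_eq_nil_of_le (by omega)]
      simp

lemma fold_bridge (pieceType : String) (S : List PVD) :
    ∀ (legos : List PVD) (a : Nat) (new old : List PVD), a ≤ legos.length →
    ∃ legos' : List PVD,
      legos'.length = legos.length ∧
      S.foldl (fun (st : List PVD × Nat × List PVD × List PVD) lego =>
          if st.2.1 < st.1.length then sortLegosInner pieceType lego st.1 st.2.1 st.2.2.1 st.2.2.2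
          else st) (legos, a, new, old) =
        (legos', legos.length - (pvSpecOuter S (legos.drop a) new old).1.length,
         (pvSpecOuter S (legos.drop a) new old).2.1,
         (pvSpecOuter S (legos.drop a) new old).2.2) ∧
      legos'.drop (legos.length - (pvSpecOuter S (legos.drop a) new old).1.length) =
        (pvSpecOuter S (legos.drop a) new old).1 := by
  induction S with
  | nil =>
    intro legos a new old ha
    refine ⟨legos, rfl, ?_, ?_⟩
    · simp only [List.foldl_nil, pvSpecOuter]
      rw [List.length_drop]
      have h2 : legos.length - (legos.length - a) = a := by omega
      rw [h2]
    · simp only [pvSpecOuter, List.foldl_nil]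
      rw [List.length_drop]
      have : legos.length - (legos.length - a) = a := by omega
      rw [this]
  | cons s S' ih =>
    intro legos a new old ha
    simp only [List.foldl_cons, pvSpecOuter]
    by_cases hlt : a < legos.length
    · rw [if_pos hlt]
      obtain ⟨legos1, hL1, hEq1, hD1⟩ :=
        inner_bridge pieceType s (legos.length - a) legos a new old (by omega) (by omega)
      rw [hEq1]
      have hlen_le : (pvSpecInner s (legos.drop a) new old).1.length ≤ legos.length := by
        have h1 := pvSpecInner_len_le s (legos.drop a) new old
        rw [List.length_drop] at h1
        omega
      obtain ⟨legos', hL, hEq, hD⟩ :=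
        ih legos1 (legos.length - (pvSpecInner s (legos.drop a) new old).1.length)
          (pvSpecInner s (legos.drop a) new old).2.1 (pvSpecInner s (legos.drop a) new old).2.2
          (by omega)
      rw [hL1] at hL hEq hD
      rw [hD1] at hEq hD
      exact ⟨legos', hL, hEq, hD⟩
    · rw [if_neg hlt]
      have hnil : legos.drop a = [] := List.drop_eq_nil_of_le (by omega)
      obtain ⟨legos', hL, hEq, hD⟩ := ih legos a new old ha
      rw [hnil] at hEq hD ⊢
      simp only [pvSpecInner]
      exact ⟨legos', hL, hEq, hD⟩

lemma specOuter_nil_R (S : List PVD) (new old : List PVD) :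
    pvSpecOuter S [] new old = ([], new, old) := by
  induction S generalizing new old with
  | nil => rfl
  | cons s S' ih => simpa [pvSpecOuter, pvSpecInner, List.foldl_cons] using ih new old

lemma get?_push (d : PySem.Dict String PVD) (k k2 : String) (v : PVD) :
    (PySem.Dict.mk (d.items ++ [(k, v)])).get? k2 = (d.get? k2).or (if k == k2 then some v else none) := by
  simp [PySem.Dict.get?, List.find?_append]
  cases h : List.find? (fun p => p.1 == k2) d.items with
  | some p => simp [Option.or]
  | none => cases hk : k == k2 <;> simp [hk, Option.or]

lemma dict_fold_get? (S : List PVD) :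
    ∀ (d0 : PySem.Dict String PVD) (k : String),
    (S.foldl (fun d ss => d.setdefault (pvGid ss) ss) d0).get? k =
      (d0.get? k).or (S.find? (fun s => pvGid s == k)) := by
  induction S with
  | nil => intro d0 k; simp
  | cons s S' ih =>
    intro d0 k
    simp only [List.foldl_cons]
    rw [ih]
    unfold PySem.Dict.setdefault
    by_cases hc : d0.contains (pvGid s) = true
    · rw [if_pos hc]
      by_cases hk : (pvGid s == k) = true
      · have hke : pvGid s = k := beq_iff_eq.mp hk
        rw [PySem.Dict.contains_eq_isSome_get?, hke] at hc
        obtain ⟨v, hv⟩ := Option.isSome_iff_exists.mp hc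
        simp [hv, hk, Option.or]
      · simp [hk]
    · rw [if_neg hc]
      rw [get?_push]
      rw [List.find?_cons]
      cases hk : (pvGid s == k) <;> cases hd : d0.get? k <;> simp [Option.or]

lemma maxId_cond (S : List PVD) (h : S.Pairwise (fun x y => pvGid x ≤ pvGid y)) (y : String) :
    pvCond ((PySem.List.pyGet? S (-1)).map pvGid) y = decide (∀ s ∈ S, pvGid s < y) := by
  rw [PySem.List.pyGet?_neg_one]
  cases hl : S.getLast? with
  | none =>
    have : S = [] := by simpa using hl
    subst this; simp [pvCond]
  | some lst =>
    obtain ⟨t, rfl⟩ := List.getLast?_eq_some_iff.mp hl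
    simp only [Option.map_some, pvCond]
    rw [List.pairwise_append] at h
    simp only [decide_eq_decide]
    constructor
    · intro hy s hs
      rcases List.mem_append.mp hs with hs | hs
      · exact lt_of_le_of_lt (h.2.2 s hs lst (by simp)) hy
      · simp at hs; subst hs; exact hy
    · intro hy; exact hy lst (by simp)

lemma bstep_all_sets (legoSet : String) :
    ∀ (R : List PVD) (d : PySem.Dict String PVD) (m : Option String),
    (∀ l ∈ R, d.get? (pvGid l) = none) →
    (∀ l ∈ R, pvCond m (pvGid l) = true) →
    ∀ (new old : List PVD),
    R.foldl (pvBStep d m legoSet) (new, old) = (new ++ R.map (fun x => pvDSet x "sets" legoSet), old) := by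
  intro R d m hget hcond
  induction R with
  | nil => intro new old; simp
  | cons c R' ih =>
    intro new old
    rw [List.foldl_cons]
    have hstep : pvBStep d m legoSet (new, old) c = (new ++ [pvDSet c "sets" legoSet], old) := by
      rw [pvBStep_eq, hget c (by simp), hcond c (by simp)]
      simp
    rw [hstep, ih (fun l hl => hget l (by simp [hl])) (fun l hl => hcond l (by simp [hl]))]
    simp

lemma main_join (pieceType legoSet : String) :
    ∀ n (S R : List PVD) (d : PySem.Dict String PVD) (m : Option String) (new old : List PVD),
    S.length + R.length ≤ n →
    S.Pairwise (fun x y => pvGid x ≤ pvGid y) → R.Pairwise (fun x y => pvGid x ≤ pvGid y) →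
    (∀ l ∈ R, d.get? (pvGid l) = S.find? (fun s => pvGid s == pvGid l)) →
    (∀ l ∈ R, pvCond m (pvGid l) = decide (∀ s ∈ S, pvGid s < pvGid l)) →
    ((pvSpecOuter S R new old).2.1 ++ (pvSpecOuter S R new old).1.map (fun x => pvDSet x "sets" legoSet),
      (pvSpecOuter S R new old).2.2) =
      R.foldl (pvBStep d m legoSet) (new, old) := by
  intro n
  induction n with
  | zero =>
    intro S R d m new old hn hS hR hd hm
    have hS0 : S = [] := List.eq_nil_of_length_eq_zero (by omega)
    have hR0 : R = [] := List.eq_nil_of_length_eq_zero (by omega)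
    subst hS0; subst hR0
    simp [pvSpecOuter]
  | succ n ih =>
    intro S R d m new old hn hS hR hd hm
    cases R with
    | nil =>
      rw [specOuter_nil_R]
      simp
    | cons c R' =>
      cases S with
      | nil =>
        have houter : pvSpecOuter [] (c :: R') new old = (c :: R', new, old) := rfl
        rw [houter]
        exact (bstep_all_sets legoSet (c :: R') d m
          (fun l hl => by rw [hd l hl]; rfl)
          (fun l hl => by rw [hm l hl]; simp) new old).symm
      | cons s S' =>
        rw [List.pairwise_cons] at hS
        have hRle : ∀ l ∈ R', pvGid c ≤ pvGid l := (List.pairwise_cons.mp hR).1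
        have hR' : R'.Pairwise (fun x y => pvGid x ≤ pvGid y) := (List.pairwise_cons.mp hR).2
        have houter : pvSpecOuter (s :: S') (c :: R') new old =
            S'.foldl (fun t x => pvSpecInner x t.1 t.2.1 t.2.2) (pvSpecInner s (c :: R') new old) := rfl
        rcases lt_trichotomy (pvGid c) (pvGid s) with hcs | hcs | hcs
        · -- c's id is below s's: c goes to new unchanged
          have hinner : pvSpecInner s (c :: R') new old = pvSpecInner s R' (new ++ [c]) old := by
            simp only [pvSpecInner]
            rw [if_pos (le_of_lt hcs), if_neg (by simp [hcs.ne])]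
          have hget : d.get? (pvGid c) = none := by
            rw [hd c (by simp)]
            apply List.find?_eq_none.mpr
            intro x hx
            have hlt : pvGid c < pvGid x := by
              rcases List.mem_cons.mp hx with rfl | hx
              · exact hcs
              · exact lt_of_lt_of_le hcs (hS.1 x hx)
            intro hgx
            exact absurd (beq_iff_eq.mp hgx).symm (ne_of_lt hlt)
          have hcond : pvCond m (pvGid c) = false := by
            rw [hm c (by simp)]
            simp only [decide_eq_false_iff_not]
            intro hall
            exact absurd (hall s (by simp)) (not_lt.mpr (le_of_lt hcs))
          rw [houter, hinner, List.foldl_cons]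
          have hstep : pvBStep d m legoSet (new, old) c = (new ++ [c], old) := by
            rw [pvBStep_eq, hget, hcond]
            simp
          rw [hstep]
          exact ih (s :: S') R' d m (new ++ [c]) old (by simp at hn ⊢; omega)
            (List.pairwise_cons.mpr hS) hR'
            (fun l hl => hd l (by simp [hl])) (fun l hl => hm l (by simp [hl]))
        · -- c's id equals s's: matched, s goes to old
          have hinner : pvSpecInner s (c :: R') new old = pvSpecInner s R' new (old ++ [s]) := by
            simp only [pvSpecInner]
            rw [if_pos (le_of_eq hcs), if_pos (by simp [hcs])]
          have hget : d.get? (pvGid c) = some s := by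
            rw [hd c (by simp)]
            exact List.find?_cons_of_pos (by simp [hcs])
          rw [houter, hinner, List.foldl_cons]
          have hstep : pvBStep d m legoSet (new, old) c = (new, old ++ [s]) := by
            rw [pvBStep_eq, hget]
          rw [hstep]
          exact ih (s :: S') R' d m new (old ++ [s]) (by simp at hn ⊢; omega)
            (List.pairwise_cons.mpr hS) hR'
            (fun l hl => hd l (by simp [hl])) (fun l hl => hm l (by simp [hl]))
        · -- c's id is above s's: s is exhausted
          have hinner : pvSpecInner s (c :: R') new old = (c :: R', new, old) := by
            simp only [pvSpecInner]
            rw [if_neg (not_le.mpr hcs)]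
          have hslt : ∀ l ∈ c :: R', pvGid s < pvGid l := by
            intro l hl
            rcases List.mem_cons.mp hl with rfl | hl
            · exact hcs
            · exact lt_of_lt_of_le hcs (hRle l hl)
          rw [houter, hinner]
          have : S'.foldl (fun t x => pvSpecInner x t.1 t.2.1 t.2.2) (c :: R', new, old) =
              pvSpecOuter S' (c :: R') new old := rfl
          rw [this]
          refine ih S' (c :: R') d m new old (by simp at hn ⊢; omega) hS.2 hR ?_ ?_
          · intro l hl
            rw [hd l hl, List.find?_cons_of_neg]
            exact fun hgx => absurd (beq_iff_eq.mp hgx) (ne_of_lt (hslt l hl))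
          · intro l hl
            rw [hm l hl]
            simp only [decide_eq_decide]
            constructor
            · intro hall x hx; exact hall x (by simp [hx])
            · intro hall x hx
              rcases List.mem_cons.mp hx with rfl | hx
              · exact hslt l hl
              · exact hall x hx

lemma main_eq (legos ssLegos : List (List (String × String))) (legoSet pieceType : String) :
    sortLegos legos ssLegos legoSet pieceType = sortLegos_alt legos ssLegos legoSet pieceType := by
  have hS := PySem.List.sorted_pairwise ssLegos pvGid
  have hR := PySem.List.sorted_pairwise legos pvGid
  obtain ⟨legos', hL, hEq, hD⟩ := fold_bridge pieceType (PySem.List.sorted ssLegos pvGid)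
    (PySem.List.sorted legos pvGid) 0 [] [] (Nat.zero_le _)
  simp only [List.drop_zero] at hEq hD
  show (sortLegosTail legoSet _ _ _, _) = _
  rw [hEq]
  simp only [sortLegos_alt]
  rw [tail_eq legoSet legos'.length legos' _ _ (by omega), hD]
  refine main_join pieceType legoSet
    ((PySem.List.sorted ssLegos pvGid).length + (PySem.List.sorted legos pvGid).length)
    (PySem.List.sorted ssLegos pvGid) (PySem.List.sorted legos pvGid)
    _ _ [] [] le_rfl hS hR ?_ ?_
  · intro l _
    rw [dict_fold_get?]
    rfl
  · intro l _
    exact maxId_cond (PySem.List.sorted ssLegos pvGid) hS (pvGid l)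

-- ===== VERDICT =====
theorem sortLegos_spec : Claim_equal_sortLegos := by
  intro legos ssLegos legoSet pieceType _ _
  exact main_eq legos ssLegos legoSet pieceType
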